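-- pv_equiv track=rewrite | github.com/aalto-ai/sparse-compgen | babyaiutil/envs/babyai/preprocess.py | mission_groups_indices
-- ===== SOURCE A (Python) =====
-- def mission_groups_indices(missions):
--     missions_groups_indices = {}
--     for i, mission in enumerate(missions):
--         mission_str = " ".join([str(x) for x in mission])
--         if mission_str not in missions_groups_indices:
--             missions_groups_indices[mission_str] = [i]
--         else:
--             missions_groups_indices[mission_str].append(i)
--
--     return missions_groups_indices
-- ===== SOURCE B (Python) =====
-- def mission_groups_indices(missions):
--     # Alternative decomposition: build all key strings once, take the distinct
--     # keys in first-appearance order, then collect each key's indices by a scan.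
--     keys = [" ".join(str(x) for x in mission) for mission in missions]
--     return {k: [i for i, k2 in enumerate(keys) if k2 == k]
--             for k in dict.fromkeys(keys)}
-- ===== Notes on version B (the rewrite author's own statement) =====
-- stated objective: alternative
-- what changed: Replaces the single hash-bucket grouping pass with a two-phase strategy: compute all key strings, dedupe them in first-appearance order, then gather each key's indices with a per-key scan (dict comprehension).
import Mathlib
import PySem

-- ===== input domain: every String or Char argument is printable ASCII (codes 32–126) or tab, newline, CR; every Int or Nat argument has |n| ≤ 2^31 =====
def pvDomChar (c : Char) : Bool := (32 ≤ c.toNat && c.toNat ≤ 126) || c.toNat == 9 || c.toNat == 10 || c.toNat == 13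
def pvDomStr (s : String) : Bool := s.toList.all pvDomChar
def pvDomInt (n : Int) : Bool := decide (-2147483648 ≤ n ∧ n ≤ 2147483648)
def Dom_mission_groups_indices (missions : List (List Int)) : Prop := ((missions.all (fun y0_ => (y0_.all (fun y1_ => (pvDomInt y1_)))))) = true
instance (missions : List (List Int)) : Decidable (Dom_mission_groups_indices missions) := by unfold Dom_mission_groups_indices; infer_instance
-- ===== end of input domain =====

-- B replaces A's single hash-bucket grouping pass with dedupe-keys-then-per-key-scan (alternative decomposition, same result, not claimed faster).


-- ===== PORT A =====
-- " ".join([str(x) for x in mission])   (shared by both Pythons verbatim)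
def pvKey (mission : List Int) : String := PySem.Str.join " " (mission.map PySem.Int.toStr)

def mission_groups_indices (missions : List (List Int)) : List (String × List Int) :=
  ((PySem.List.enumerate missions 0).foldl
    (fun (d : PySem.Dict String (List Int)) p =>
      let mission_str := pvKey p.2
      if d.contains mission_str = false then d.insert mission_str [p.1]
      else d.modify mission_str [] (· ++ [p.1]))
    PySem.Dict.empty).items

-- ===== PORT B =====
def mission_groups_indices_alt (missions : List (List Int)) : List (String × List Int) :=
  let keys := missions.map pvKey
  (PySem.List.dedup keys).map
    (fun k => (k, ((PySem.List.enumerate keys 0).filter (fun p => p.2 == k)).map (·.1)))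

-- ===== PRECONDITION & SPEC =====
def Spec_mission_groups_indices (missions : List (List Int)) (out : List (String × List Int)) : Prop := out = mission_groups_indices_alt missions
instance (missions : List (List Int)) (out : List (String × List Int)) : Decidable (Spec_mission_groups_indices missions out) := by unfold Spec_mission_groups_indices; infer_instance

-- ===== CLAIM (what is proved, stated in full; the proofs are below) =====
def Claim_equal_mission_groups_indices : Prop := ∀ (missions : List (List Int)), Dom_mission_groups_indices missions → Spec_mission_groups_indices missions (mission_groups_indices missions)

-- ===== LEMMAS AND PROOFS =====

-- A's branch (insert a fresh [i] / append to the existing bucket) is exactly one d.modify-append step.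
lemma step_eq_modify (d : PySem.Dict String (List Int)) (p : Int × List Int) :
    (if d.contains (pvKey p.2) = false then d.insert (pvKey p.2) [p.1]
     else d.modify (pvKey p.2) [] (· ++ [p.1]))
    = d.modify (pvKey p.2) [] (· ++ [p.1]) := by
  by_cases h : d.contains (pvKey p.2) = false
  · simp [h, PySem.Dict.modify, PySem.Dict.getD_of_not_contains (h := h)]
  · simp [h]

lemma enumerate_map {α β : Type} (f : α → β) (xs : List α) (s : Int) :
    PySem.List.enumerate (xs.map f) s = (PySem.List.enumerate xs s).map (fun p => (p.1, f p.2)) := by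
  induction xs generalizing s with
  | nil => simp [PySem.List.enumerate_nil]
  | cons x xs ih => simp [PySem.List.enumerate_cons, ih]

-- ===== VERDICT (by name: the statement is the Claim_ definition above) =====
theorem mission_groups_indices_spec : Claim_equal_mission_groups_indices := by
  intro missions _
  unfold Spec_mission_groups_indices mission_groups_indices mission_groups_indices_alt
  show _ = (PySem.List.dedup (missions.map pvKey)).map
      (fun k => (k, ((PySem.List.enumerate (missions.map pvKey) 0).filter (fun p => p.2 == k)).map (·.1)))
  have hstep : ((PySem.List.enumerate missions 0).foldl
      (fun (d : PySem.Dict String (List Int)) p =>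
        let mission_str := pvKey p.2
        if d.contains mission_str = false then d.insert mission_str [p.1]
        else d.modify mission_str [] (· ++ [p.1]))
      PySem.Dict.empty)
      = ((PySem.List.enumerate missions 0).map (fun p => (pvKey p.2, p.1))).foldl
          (fun (d : PySem.Dict String (List Int)) q => d.modify q.1 [] (· ++ [q.2])) PySem.Dict.empty := by
    rw [List.foldl_map]
    simp only [step_eq_modify]
  rw [hstep]
  have hmapfst : ((PySem.List.enumerate missions 0).map (fun p => (pvKey p.2, p.1))).map Prod.fst
      = missions.map pvKey := by
    rw [List.map_map, ← PySem.List.map_snd_enumerate missions 0, List.map_map]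
    simp [Function.comp_def]
  have hnodup : (((PySem.List.enumerate missions 0).map (fun p => (pvKey p.2, p.1))).foldl
      (fun (d : PySem.Dict String (List Int)) q => d.modify q.1 [] (· ++ [q.2])) PySem.Dict.empty).keys.Nodup :=
    PySem.Dict.nodup_keys_foldl_modify_key _ Prod.fst [] (fun d q => (· ++ [q.2])) _ (by simp)
  rw [PySem.Dict.items_eq_map_keys _ hnodup []]
  rw [PySem.Dict.keys_foldl_modify_key]
  rw [PySem.Dict.keys_empty]
  have hupd : PySem.Set.update ([] : List String)
      (((PySem.List.enumerate missions 0).map (fun p => (pvKey p.2, p.1))).map Prod.fst)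
      = PySem.List.dedup (missions.map pvKey) := by rw [hmapfst]; rfl
  rw [hupd]
  apply List.map_congr_left
  intro k _
  rw [PySem.Dict.getD_foldl_modify_append]
  rw [enumerate_map pvKey missions 0]
  simp [List.filter_map, List.map_map, Function.comp_def, PySem.Dict.getD_empty]
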